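-- pv_equiv track=rewrite | github.com/tn3w/is-crawler | is_crawler/__init__.py | _email_like
-- ===== SOURCE A (Python) =====
-- def _email_like(ua: str) -> bool:
--     i = 0
--     while (i := ua.find("@", i)) != -1:
--         j = i + 1
--         while j < len(ua) and (ua[j].isalnum() or ua[j] in "_.-"):
--             j += 1
--
--         token = ua[i + 1 : j]
--         if "." in token and i > 0:
--             tld = token.rsplit(".", 1)[1]
--             if len(tld) >= 2 and tld.isalpha():
--                 return True
--         i += 1
--     return False
-- ===== SOURCE B (Python) =====
-- def _email_like(ua: str) -> bool:
--     # Split on '@' once; each piece after a '@' carries the candidate token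
--     # as its leading run of email-ish characters.
--     parts = ua.split("@")
--     before = parts[0] != ""        # was there a character before this '@'?
--     for part in parts[1:]:
--         token = part
--         for n, c in enumerate(part):
--             if not (c.isalnum() or c in "_.-"):
--                 token = part[:n]
--                 break
--         if before and "." in token:
--             tld = token.rsplit(".", 1)[1]
--             if len(tld) >= 2 and tld.isalpha():
--                 return True
--         before = True
--     return False
-- ===== Notes on version B (the rewrite author's own statement) =====
-- stated objective: alternative
-- what changed: B replaces A's index-based double while-loop (repeated str.find with a cursor plus a manual index scan) by splitting the string once at the separator and folding over the resulting pieces, extracting each candidate token as the leading run of email-ish characters of its piece and tracking the preceding-character guard with a rolling flag instead of an index comparison.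
import Mathlib
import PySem

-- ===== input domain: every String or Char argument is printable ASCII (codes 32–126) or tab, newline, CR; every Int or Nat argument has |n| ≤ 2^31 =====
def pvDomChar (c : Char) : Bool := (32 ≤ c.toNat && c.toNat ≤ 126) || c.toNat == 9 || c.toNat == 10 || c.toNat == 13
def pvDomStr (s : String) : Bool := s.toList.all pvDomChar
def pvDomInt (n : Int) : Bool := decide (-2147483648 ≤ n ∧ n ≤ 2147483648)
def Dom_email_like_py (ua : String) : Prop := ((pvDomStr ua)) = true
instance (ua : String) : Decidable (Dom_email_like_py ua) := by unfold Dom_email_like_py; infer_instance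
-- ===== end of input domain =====

-- B replaces A's cursor-driven find loop by a split-at-separator decomposition; objective: alternative (same cost class).

-- shared character test: c.isalnum() or c in "_.-" (identical expression in both sources)
def allowedChar (c : Char) : Bool := PySem.Chars.isalnum c || PySem.Chars.isIn [c] ['_', '.', '-']

-- shared helper: token.rsplit(".", 1)[1]; hand port, exact whenever '.' ∈ token (both callers guard on that)
def rsplitDotLast (token : List Char) : List Char :=
  token.drop ((PySem.Chars.rfind token ['.']).toNat + 1)

-- ===== PORT A =====
-- inner while: j += 1 while j < len(ua) and (ua[j].isalnum() or ua[j] in "_.-")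
def innerA (s : List Char) (j : Nat) : Nat :=
  if h : j < s.length then
    if allowedChar s[j] then innerA s (j + 1) else j
  else j
termination_by s.length - j

-- bounds of ua.find("@", i) when it is not -1 (used for outerA's recursion)
theorem findFrom_at_bounds (s : List Char) (i : Nat) (h : i ≤ s.length)
    (hf : ¬ PySem.Chars.findFrom s ['@'] (i : Int) none = -1) :
    i ≤ (PySem.Chars.findFrom s ['@'] (i : Int) none).toNat ∧
      (PySem.Chars.findFrom s ['@'] (i : Int) none).toNat < s.length := by
  obtain ⟨h1, h2, -⟩ := PySem.Chars.findFrom_natCast_spec s ['@'] i h hf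
  have hlt : ¬ s.length ≤ (PySem.Chars.findFrom s ['@'] (i : Int) none).toNat := by
    intro hle
    rw [List.drop_eq_nil_iff.mpr hle] at h2
    simp at h2
  exact ⟨by omega, by omega⟩

-- outer while (i := ua.find("@", i)) != -1
def outerA (s : List Char) (i : Nat) (h : i ≤ s.length) : Bool :=
  if hf : PySem.Chars.findFrom s ['@'] (i : Int) none = -1 then false
  else
    let idx := (PySem.Chars.findFrom s ['@'] (i : Int) none).toNat
    let j := innerA s (idx + 1)
    let token := PySem.Chars.slice s (some ((idx + 1 : Nat) : Int)) (some ((j : Nat) : Int))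
    if PySem.Chars.isIn ['.'] token && decide (0 < idx) then
      let tld := rsplitDotLast token
      if decide (2 ≤ tld.length) && PySem.Chars.strIsalpha tld then true
      else outerA s (idx + 1) (findFrom_at_bounds s i h hf).2
    else outerA s (idx + 1) (findFrom_at_bounds s i h hf).2
termination_by s.length - i
decreasing_by
  all_goals
    have := (findFrom_at_bounds s i h hf).1
    have := (findFrom_at_bounds s i h hf).2
    omega

def email_like_py (ua : String) : Bool := outerA ua.toList 0 (Nat.zero_le _)

-- ===== PORT B =====
-- token = the leading run of allowed characters of part (the for/enumerate/break loop of Source B)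
def takeRun (cs : List Char) : List Char :=
  match cs with
  | [] => []
  | c :: rest => if allowedChar c then c :: takeRun rest else []

-- ua.split("@"): hand port of str.split, exact for the single-character separator "@"
def splitAtSign (cs : List Char) : List (List Char) :=
  match cs with
  | [] => [[]]
  | c :: rest =>
    let ps := splitAtSign rest
    if c = '@' then [] :: ps else (c :: ps.headD []) :: ps.tail

-- for part in parts[1:], with the rolling 'before' flag
def loopB (parts : List (List Char)) (before : Bool) : Bool :=
  match parts with
  | [] => false
  | p :: rest =>
    let token := takeRun p
    if before && PySem.Chars.isIn ['.'] token then
      let tld := rsplitDotLast token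
      if decide (2 ≤ tld.length) && PySem.Chars.strIsalpha tld then true
      else loopB rest true
    else loopB rest true

def email_like_py_alt (ua : String) : Bool :=
  match splitAtSign ua.toList with
  | [] => false
  | p0 :: rest => loopB rest (decide (p0 ≠ []))

-- ===== PRECONDITION & SPEC =====
def Spec_email_like_py (ua : String) (out : Bool) : Prop := out = email_like_py_alt ua
instance (ua : String) (out : Bool) : Decidable (Spec_email_like_py ua out) := by unfold Spec_email_like_py; infer_instance

-- ===== CLAIM (what is proved, stated in full; the proofs are below) =====
def Claim_equal_email_like_py : Prop := ∀ (ua : String), Dom_email_like_py ua → Spec_email_like_py ua (email_like_py ua)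

-- ===== LEMMAS AND PROOFS =====

-- the separator test used by the proofs (boolean form of (· ≠ '@'))
def notAt (c : Char) : Bool := !(c == '@')

theorem singleton_prefix_iff (c : Char) (l : List Char) : [c] <+: l ↔ l.head? = some c := by
  cases l with
  | nil => simp
  | cons x xs =>
    constructor
    · rintro ⟨t, ht⟩
      simp at ht
      simp [ht.1]
    · intro hx
      simp at hx
      exact ⟨xs, by simp [hx]⟩

theorem singleton_infix_iff (c : Char) (l : List Char) : [c] <:+: l ↔ c ∈ l := by
  constructor
  · intro h
    exact h.mem (by simp)
  · intro h
    obtain ⟨a, b, rfl⟩ := List.append_of_mem h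
    exact ⟨a, b, by simp⟩

theorem takeRun_eq_takeWhile (l : List Char) : takeRun l = l.takeWhile allowedChar := by
  induction l with
  | nil => rfl
  | cons c rest ih =>
    simp only [takeRun, List.takeWhile_cons]
    by_cases hc : allowedChar c = true <;> simp [hc, ih]

theorem takeRun_takeWhile_ne_at (l : List Char) :
    takeRun (l.takeWhile notAt) = takeRun l := by
  induction l with
  | nil => rfl
  | cons c rest ih =>
    by_cases hc : c = '@'
    · subst hc
      have h1 : allowedChar '@' = false := by decide
      simp [notAt, takeRun, h1]
    · by_cases ha : allowedChar c = true <;>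
        simp [notAt, hc, takeRun, ha, ih]

theorem splitAtSign_ne_nil (l : List Char) : splitAtSign l ≠ [] := by
  cases l with
  | nil => simp [splitAtSign]
  | cons c rest =>
    simp only [splitAtSign]
    split <;> simp

theorem splitAtSign_head (l : List Char) :
    (splitAtSign l).headD [] = l.takeWhile notAt := by
  induction l with
  | nil => rfl
  | cons c rest ih =>
    by_cases hc : c = '@'
    · subst hc; simp [splitAtSign, notAt]
    · cases hs : splitAtSign rest with
      | nil => exact absurd hs (splitAtSign_ne_nil rest)
      | cons p ps =>
        rw [hs] at ih
        simp only [List.headD_cons] at ih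
        simp [splitAtSign, hc, notAt, hs, ih]

theorem splitAtSign_no_at (l : List Char) (h : '@' ∉ l) : splitAtSign l = [l] := by
  induction l with
  | nil => rfl
  | cons c rest ih =>
    have hc : ¬ c = '@' := by rintro rfl; exact h (by simp)
    have hrest : '@' ∉ rest := fun hm => h (by simp [hm])
    simp only [splitAtSign]
    rw [if_neg hc, ih hrest]
    simp

theorem splitAtSign_append (a u : List Char) (h : '@' ∉ a) :
    splitAtSign (a ++ '@' :: u) = a :: splitAtSign u := by
  induction a with
  | nil => simp [splitAtSign]
  | cons c rest ih =>
    have hc : ¬ c = '@' := by rintro rfl; exact h (by simp)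
    have hrest : '@' ∉ rest := fun hm => h (by simp [hm])
    have hr := ih hrest
    simp only [List.cons_append, splitAtSign]
    rw [if_neg hc, hr]
    simp

theorem innerA_eq (s : List Char) (j : Nat) :
    innerA s j = j + (takeRun (s.drop j)).length := by
  by_cases h : j < s.length
  · rw [innerA]
    have hd : s.drop j = s[j] :: s.drop (j + 1) := List.drop_eq_getElem_cons h
    by_cases ha : allowedChar s[j] = true
    · have hrec := innerA_eq s (j + 1)
      rw [dif_pos h, if_pos ha, hrec, hd]
      simp only [takeRun, ha, if_true, List.length_cons]
      omega
    · rw [dif_pos h, if_neg ha, hd]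
      simp only [takeRun]
      rw [if_neg ha]
      simp
  · rw [innerA]
    have hnil : s.drop j = [] := List.drop_eq_nil_of_le (by omega)
    rw [dif_neg h, hnil]
    simp [takeRun]
termination_by s.length - j

theorem find_no_at (t : List Char) (h : '@' ∉ t) : PySem.Chars.find t ['@'] = -1 := by
  rw [PySem.Chars.find_eq_neg_one_iff]
  rw [singleton_infix_iff]
  exact h

theorem find_at (a u : List Char) (h : '@' ∉ a) :
    PySem.Chars.find (a ++ '@' :: u) ['@'] = (a.length : Int) := by
  have hmem : '@' ∈ a ++ '@' :: u := by simp
  have hnn : 0 ≤ PySem.Chars.find (a ++ '@' :: u) ['@'] := by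
    rw [PySem.Chars.find_nonneg_iff, singleton_infix_iff]
    exact hmem
  obtain ⟨hpre, hmin⟩ := PySem.Chars.find_spec hnn
  have hle : (PySem.Chars.find (a ++ '@' :: u) ['@']).toNat ≤ a.length := by
    by_contra hgt
    refine hmin a.length (by omega) ((singleton_prefix_iff _ _).mpr ?_)
    rw [List.head?_drop]
    rw [List.getElem?_append_right (le_refl a.length)]
    simp
  set f := (PySem.Chars.find (a ++ '@' :: u) ['@']).toNat with hfdef
  have hf : f = a.length := by
    by_contra hne
    have hflt : f < a.length := by omega
    have hsome : (a ++ '@' :: u)[f]? = some '@' := by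
      rw [← List.head?_drop]
      exact (singleton_prefix_iff _ _).mp hpre
    rw [List.getElem?_append_left hflt] at hsome
    have hg : a[f] = '@' := by
      have hx := List.getElem?_eq_getElem (l := a) hflt
      rw [hx] at hsome
      exact Option.some.inj hsome
    exact h (hg ▸ List.getElem_mem hflt)
  omega

theorem exists_decomp (t : List Char) (h : '@' ∈ t) :
    ∃ u, t = t.takeWhile notAt ++ '@' :: u := by
  induction t with
  | nil => simp at h
  | cons c rest ih =>
    by_cases hc : c = '@'
    · subst hc
      exact ⟨rest, by simp [notAt]⟩
    · have hr : '@' ∈ rest := by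
        simp at h
        tauto
      obtain ⟨u, hu⟩ := ih hr
      refine ⟨u, ?_⟩
      simp only [List.takeWhile_cons, notAt]
      rw [if_pos (by simp [hc])]
      simpa using hu

theorem not_at_mem_takeWhile (t : List Char) : '@' ∉ t.takeWhile notAt := by
  intro hmem
  have := List.mem_takeWhile_imp hmem
  simp [notAt] at this

-- the heart: A's cursor loop from i equals B's loop over the pieces of s.drop i after the first '@'
theorem outerA_eq (s : List Char) (i : Nat) (h : i ≤ s.length) :
    outerA s i h =
      loopB (splitAtSign (s.drop i)).tail
        (decide (0 < i) || decide ((splitAtSign (s.drop i)).headD [] ≠ [])) := by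
  by_cases hmem : '@' ∈ s.drop i
  · -- decompose s.drop i = a ++ '@' :: u
    obtain ⟨u, hu⟩ := exists_decomp _ hmem
    have hna0 : '@' ∉ (s.drop i).takeWhile notAt := not_at_mem_takeWhile _
    generalize hadef : List.takeWhile notAt (s.drop i) = a at hu hna0
    have hna : '@' ∉ a := hna0
    have hfind : PySem.Chars.find (s.drop i) ['@'] = (a.length : Int) := by
      rw [hu]; exact find_at a u hna
    have hFF : PySem.Chars.findFrom s ['@'] (i : Int) none = (i : Int) + a.length := by
      rw [PySem.Chars.findFrom_natCast s ['@'] i h, hfind]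
      simp
    have hfne : ¬ PySem.Chars.findFrom s ['@'] (i : Int) none = -1 := by
      rw [hFF]; omega
    have hidx : (PySem.Chars.findFrom s ['@'] (i : Int) none).toNat = i + a.length := by
      rw [hFF]; omega
    have hlen : i + a.length < s.length := by
      have := (findFrom_at_bounds s i h hfne).2
      omega
    have hdrop1 : s.drop (i + a.length + 1) = u := by
      have h1 : s.drop (i + a.length + 1) = (s.drop i).drop (a.length + 1) := by
        rw [List.drop_drop]; ring_nf
      rw [h1, hu, List.append_cons]
      have hlen2 : (a ++ ['@']).length = a.length + 1 := by simp
      rw [← hlen2, List.drop_left]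
    -- token on the A side
    have htokenA :
        PySem.Chars.slice s (some ((i + a.length + 1 : Nat) : Int))
            (some ((innerA s (i + a.length + 1) : Nat) : Int)) = takeRun u := by
      rw [innerA_eq s (i + a.length + 1), hdrop1]
      simp only [PySem.Chars.slice_eq_listSlice]
      rw [PySem.List.slice_natCast, hdrop1]
      have hpre : takeRun u <+: u := by
        rw [takeRun_eq_takeWhile]; exact List.takeWhile_prefix _
      have htake := List.prefix_iff_eq_take.mp hpre
      have harith : i + a.length + 1 + (takeRun u).length - (i + a.length + 1)
          = (takeRun u).length := by omega
      rw [harith]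
      exact htake.symm
    have hsplit : splitAtSign (s.drop i) = a :: splitAtSign u := by
      rw [hu]; exact splitAtSign_append a u hna
    rw [outerA, dif_neg hfne, hsplit]
    simp only [List.tail_cons, List.headD_cons, hidx, htokenA]
    cases hsu : splitAtSign u with
    | nil => exact absurd hsu (splitAtSign_ne_nil u)
    | cons b0 bs =>
      have hb0 : b0 = u.takeWhile notAt := by
        have hh := splitAtSign_head u
        rw [hsu] at hh
        simpa using hh
      have htb : takeRun b0 = takeRun u := by
        rw [hb0]; exact takeRun_takeWhile_ne_at u
      have hIH := outerA_eq s (i + a.length + 1) (by omega)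
      rw [hdrop1, hsu] at hIH
      simp only [List.tail_cons] at hIH
      have hbef : (decide (0 < i + a.length + 1) || decide ((b0 :: bs).headD [] ≠ [])) = true := by
        simp
      rw [hbef] at hIH
      simp only [loopB, htb]
      by_cases hdot : PySem.Chars.isIn ['.'] (takeRun u) = true
      · by_cases hpos : 0 < i + a.length
        · have hg1 : (decide (0 < i) || decide (a ≠ [])) = true := by
            rcases Nat.eq_zero_or_pos i with hi | hi
            · have hane : a ≠ [] := by
                intro he
                rw [hi, he] at hpos
                simp at hpos
              simp [hane]
            · simp [hi]
          simp [hdot, hpos, hIH]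
          intro h1 h2 _ _
          rw [h1, h2] at hg1
          simp at hg1
        · have hg0 : (decide (0 < i) || decide (a ≠ [])) = false := by
            have hi : i = 0 := by omega
            have ha0 : a = [] := by
              cases ha : a with
              | nil => rfl
              | cons x xs =>
                exact absurd (by simp [hi, ha] : 0 < i + a.length) hpos
            simp [hi, ha0]
          simp [hdot, hpos, hIH]
          intro h1 _ _
          rcases h1 with h1 | h1 <;> [skip; skip] <;>
            simp [h1] at hg0
      · rw [Bool.not_eq_true] at hdot
        simp [hdot, hIH]
  · -- no '@' at or after i: both sides are false
    have hfind : PySem.Chars.find (s.drop i) ['@'] = -1 := find_no_at _ hmem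
    have hFF : PySem.Chars.findFrom s ['@'] (i : Int) none = -1 := by
      rw [PySem.Chars.findFrom_natCast s ['@'] i h, hfind]
      simp
    rw [outerA]
    simp [hFF, splitAtSign_no_at _ hmem, loopB]
termination_by s.length - i
decreasing_by omega

-- ===== VERDICT (by name: the statement is the Claim_ definition above) =====
theorem email_like_py_spec : Claim_equal_email_like_py := by
  intro ua _
  unfold Spec_email_like_py email_like_py email_like_py_alt
  rw [outerA_eq ua.toList 0 (Nat.zero_le _)]
  cases hs : splitAtSign ua.toList with
  | nil => exact absurd hs (splitAtSign_ne_nil _)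
  | cons p0 rest => simp [hs]
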